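-- pv_equiv track=rewrite | github.com/saeidalidadi/python-course | projects/word-game/random_words.py | set_word_in_array
-- ===== SOURCE A (Python) =====
-- def set_word_in_array(arr, dencity):
--   lines = []
--   matrix = [[None for c in range(dencity)] for r in range(dencity)]
--
--   current_position = 0
--
--   for line in arr:
--     for char in line:
--         lines.append(char)
--
--   if(lines) :
--     wordArray = list(lines)
--     for i in range(dencity):
--       for j in range(dencity):
--         if(current_position < len(wordArray)):
--           matrix[i][j] = wordArray[current_position]
--           current_position += 1
--         else:
--           matrix[i][j] = 'A'
--
--   return matrix
-- ===== SOURCE B (Python) =====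
-- def set_word_in_array(arr, dencity):
--     chars = [c for line in arr for c in line]
--     if not chars:
--         return [[None] * dencity for _ in range(dencity)]
--     total = max(dencity, 0) ** 2
--     padded = (chars + ['A'] * max(total - len(chars), 0))[:total]
--     return [padded[i * dencity:(i + 1) * dencity] for i in range(dencity)]
-- ===== Notes on version B (the rewrite author's own statement) =====
-- stated objective: simpler
-- what changed: Replaces A's position-counter nested fill loops over a preallocated mutable matrix with a flatten-pad-truncate-and-chunk-by-slicing pipeline.
import Mathlib
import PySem

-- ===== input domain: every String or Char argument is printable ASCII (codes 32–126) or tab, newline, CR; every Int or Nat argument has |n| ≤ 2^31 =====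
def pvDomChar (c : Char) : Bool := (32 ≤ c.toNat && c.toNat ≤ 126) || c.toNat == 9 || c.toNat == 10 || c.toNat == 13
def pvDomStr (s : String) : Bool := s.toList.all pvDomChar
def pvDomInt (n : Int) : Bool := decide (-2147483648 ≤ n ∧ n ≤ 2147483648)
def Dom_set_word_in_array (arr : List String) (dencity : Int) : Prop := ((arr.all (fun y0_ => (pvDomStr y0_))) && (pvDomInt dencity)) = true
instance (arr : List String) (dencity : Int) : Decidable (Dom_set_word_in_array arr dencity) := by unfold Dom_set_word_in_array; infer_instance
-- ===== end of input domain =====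

-- B replaces A's position-counter nested fill loops with a flatten-pad-chunk pipeline (objective: simpler).
-- ===== PORT A =====
-- (indices i, j come from range(dencity) so they are ≥ 0: .toNat is exact here;
--  current_position < len(wordArray) guards the wordArray[current_position] access, so pyGetD is exact)
def set_word_in_array (arr : List String) (dencity : Int) : List (List (Option String)) :=
  let lines : List String :=
    arr.foldl (fun acc line => line.toList.foldl (fun a ch => a ++ [String.ofList [ch]]) acc) []
  let matrix : List (List (Option String)) :=
    (PySem.List.pyRange 0 dencity 1).map (fun _ =>
      (PySem.List.pyRange 0 dencity 1).map (fun _ => (none : Option String)))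
  if lines.isEmpty then matrix
  else
    let wordArray := lines
    ((PySem.List.pyRange 0 dencity 1).foldl
      (fun (st : List (List (Option String)) × Int) i =>
        (PySem.List.pyRange 0 dencity 1).foldl
          (fun (st : List (List (Option String)) × Int) j =>
            if st.2 < (wordArray.length : Int) then
              (st.1.modify i.toNat
                 (fun row => row.set j.toNat (some (PySem.List.pyGetD wordArray st.2 ""))),
               st.2 + 1)
            else
              (st.1.modify i.toNat (fun row => row.set j.toNat (some "A")), st.2))
          st)
      (matrix, 0)).1

-- ===== PORT B =====
-- ([None] * dencity has max dencity 0 elements: List.replicate dencity.toNat is exact)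
def set_word_in_array_alt (arr : List String) (dencity : Int) : List (List (Option String)) :=
  let chars : List (Option String) :=
    arr.flatMap (fun line => line.toList.map (fun ch => some (String.ofList [ch])))
  if chars.isEmpty then
    (PySem.List.pyRange 0 dencity 1).map
      (fun _ => List.replicate dencity.toNat (none : Option String))
  else
    let total : Int := (max dencity 0) ^ 2
    let padded : List (Option String) :=
      PySem.List.slice
        (chars ++ List.replicate (max (total - (chars.length : Int)) 0).toNat (some "A"))
        none (some total)
    (PySem.List.pyRange 0 dencity 1).map
      (fun i => PySem.List.slice padded (some (i * dencity)) (some ((i + 1) * dencity)))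

-- ===== PRECONDITION & SPEC =====
def Spec_set_word_in_array (arr : List String) (dencity : Int) (out : List (List (Option String))) : Prop := out = set_word_in_array_alt arr dencity
instance (arr : List String) (dencity : Int) (out : List (List (Option String))) : Decidable (Spec_set_word_in_array arr dencity out) := by unfold Spec_set_word_in_array; infer_instance

-- ===== CLAIM (what is proved, stated in full; the proofs are below) =====
def Claim_equal_set_word_in_array : Prop := ∀ (arr : List String) (dencity : Int), Dom_set_word_in_array arr dencity → Spec_set_word_in_array arr dencity (set_word_in_array arr dencity)

-- ===== LEMMAS AND PROOFS =====

-- the flattened character list both programs build (as single-char strings, A's `lines`)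
def pvLines (arr : List String) : List String :=
  arr.flatMap (fun l => l.toList.map (fun ch => String.ofList [ch]))

-- the value A writes at flat position p (char while p < len, 'A' afterwards)
def pvG (L : List String) (p : Int) : Option String :=
  if p < (L.length : Int) then some (PySem.List.pyGetD L p "") else some "A"

-- the row starting at flat position p
def pvRow (L : List String) (d : Int) (p : Int) : List (Option String) :=
  (PySem.List.pyRange 0 d 1).map (fun j => pvG L (p + j))

lemma pvLines_eq (arr : List String) :
    arr.foldl (fun acc line => line.toList.foldl (fun a ch => a ++ [String.ofList [ch]]) acc) []
      = pvLines arr := by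
  have h : (fun (acc : List String) (line : String) =>
      line.toList.foldl (fun a ch => a ++ [String.ofList [ch]]) acc)
      = fun acc line => acc ++ line.toList.map (fun ch => String.ofList [ch]) := by
    funext acc line; exact PySem.List.foldl_append_singleton_eq_map _ _ _
  rw [h, PySem.List.foldl_append_eq_flatMap]; simp [pvLines]

lemma pvChars_eq (arr : List String) :
    arr.flatMap (fun line => line.toList.map (fun ch => some (String.ofList [ch])))
      = (pvLines arr).map some := by
  unfold pvLines
  simp [List.map_flatMap, List.map_map]; rfl

lemma pvModify_append_cons {α : Type} (xs : List α) (y : α) (ys : List α) (f : α → α) :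
    (xs ++ y :: ys).modify xs.length f = xs ++ f y :: ys := by
  induction xs with
  | nil => simp [List.modify]
  | cons x xs ih => simp [List.modify] at *; exact ih

lemma pvModify_modify {α : Type} (i : Nat) (f g : α → α) (m : List α) :
    (m.modify i f).modify i g = m.modify i (fun x => g (f x)) := by
  induction m generalizing i with
  | nil => simp
  | cons x xs ih => cases i with
    | zero => simp [List.modify]
    | succ n => simp [List.modify]; exact ih n

lemma pvFoldl_modify {α β : Type} (l : List β) (i : Nat) (f : β → α → α) (m : List α) :
    l.foldl (fun m j => m.modify i (f j)) m = m.modify i (fun r => l.foldl (fun r j => f j r) r) := by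
  induction l generalizing m with
  | nil => simp only [List.foldl_nil]; exact (List.modify_id _ _).symm
  | cons b t ih => simp only [List.foldl_cons]; rw [ih, pvModify_modify]

lemma pvG_min (L : List String) (q j : Int) (hj : 0 ≤ j) :
    pvG L (min (L.length : Int) q + j) = pvG L (q + j) := by
  unfold pvG
  by_cases h : q ≤ (L.length : Int)
  · rw [min_eq_right h]
  · rw [min_eq_left (by omega)]
    split_ifs with h1 h2 <;> first | rfl | omega

-- A's inner loop: fills row i at columns c..d-1 from flat position p, advancing while p < len
lemma pvInner_fold (L : List String) (i d : Int) :
    ∀ (k : Nat) (c p : Int) (m : List (List (Option String))),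
      (d - c).toNat = k → 0 ≤ p → p ≤ (L.length : Int) →
    (PySem.List.pyRange c d 1).foldl
        (fun (st : List (List (Option String)) × Int) j =>
          if st.2 < (L.length : Int) then
            (st.1.modify i.toNat
               (fun row => row.set j.toNat (some (PySem.List.pyGetD L st.2 ""))),
             st.2 + 1)
          else
            (st.1.modify i.toNat (fun row => row.set j.toNat (some "A")), st.2))
        (m, p)
      = ((PySem.List.pyRange c d 1).foldl
           (fun mm j => mm.modify i.toNat (fun r => r.set j.toNat (pvG L (p + (j - c))))) m,
         min (L.length : Int) (p + ((d - c).toNat : Int))) := by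
  intro k
  induction k with
  | zero =>
    intro c p m h0 hp hpn
    rw [PySem.List.pyRange_one_eq_nil (by omega)]
    simp only [List.foldl_nil, h0]
    congr 1
    omega
  | succ k ih =>
    intro c p m hk hp hpn
    have hcd : c < d := by omega
    rw [PySem.List.pyRange_one_cons hcd]
    simp only [List.foldl_cons]
    by_cases hpl : p < (L.length : Int)
    · simp only [hpl, if_true]
      rw [ih (c + 1) (p + 1) _ (by omega) (by omega) (by omega)]
      have hv : pvG L (p + (c - c)) = some (PySem.List.pyGetD L p "") := by
        unfold pvG; rw [sub_self, add_zero, if_pos hpl]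
      rw [hv]
      have hf : (fun (mm : List (List (Option String))) j =>
            mm.modify i.toNat (fun r => r.set j.toNat (pvG L (p + 1 + (j - (c + 1))))))
          = (fun mm j => mm.modify i.toNat (fun r => r.set j.toNat (pvG L (p + (j - c))))) := by
        funext mm j; ring_nf
      rw [hf]
      congr 1
      omega
    · simp only [hpl, if_false]
      rw [ih (c + 1) p _ (by omega) hp hpn]
      have hv : pvG L (p + (c - c)) = some "A" := by
        unfold pvG; rw [sub_self, add_zero, if_neg hpl]
      rw [hv]
      congr 1
      · refine PySem.List.foldl_congr_mem _ _ _ _ (fun acc x hx => ?_)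
        rw [PySem.List.mem_pyRange_one] at hx
        have h1 : pvG L (p + (x - (c + 1))) = some "A" := by
          unfold pvG; rw [if_neg (by omega)]
        have h2 : pvG L (p + (x - c)) = some "A" := by
          unfold pvG; rw [if_neg (by omega)]
        rw [h1, h2]
      · omega

-- setting every column of a full-width row yields the mapped row
lemma pvFill_row {α : Type} (v : Int → α) (d : Int) :
    ∀ (k : Nat) (c : Int) (r : List α),
      (d - c).toNat = k → 0 ≤ c → r.length = d.toNat →
    (PySem.List.pyRange c d 1).foldl (fun r j => r.set j.toNat (v j)) r
      = r.take c.toNat ++ (PySem.List.pyRange c d 1).map v := by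
  intro k
  induction k with
  | zero =>
    intro c r h0 hc hr
    rw [PySem.List.pyRange_one_eq_nil (by omega)]
    simp only [List.foldl_nil, List.map_nil, List.append_nil]
    rw [List.take_of_length_le (by omega)]
  | succ k ih =>
    intro c r hk hc hr
    have hcd : c < d := by omega
    rw [PySem.List.pyRange_one_cons hcd]
    simp only [List.foldl_cons, List.map_cons]
    rw [ih (c + 1) _ (by omega) (by omega) (by simpa using hr)]
    have h1 : (c + 1).toNat = c.toNat + 1 := by omega
    have hlt : c.toNat < r.length := by omega
    rw [h1, List.take_add_one, List.take_set, List.getElem?_set_self hlt,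
      List.set_eq_of_length_le (by simp)]
    simp

-- A's outer loop: rows a..d-1 still blank, flat position min len (a*d)
lemma pvOuter_fold (L : List String) (d : Int) (hd : 0 < d) :
    ∀ (k : Nat) (a : Int), 0 ≤ a → a ≤ d → (d - a).toNat = k →
    (PySem.List.pyRange a d 1).foldl
        (fun (st : List (List (Option String)) × Int) i =>
          (PySem.List.pyRange 0 d 1).foldl
            (fun (st : List (List (Option String)) × Int) j =>
              if st.2 < (L.length : Int) then
                (st.1.modify i.toNat
                   (fun row => row.set j.toNat (some (PySem.List.pyGetD L st.2 ""))),
                 st.2 + 1)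
              else
                (st.1.modify i.toNat (fun row => row.set j.toNat (some "A")), st.2))
            st)
        ((PySem.List.pyRange 0 a 1).map (fun i => pvRow L d (i * d))
           ++ List.replicate (d - a).toNat (List.replicate d.toNat (none : Option String)),
         min (L.length : Int) (a * d))
      = ((PySem.List.pyRange 0 d 1).map (fun i => pvRow L d (i * d)),
         min (L.length : Int) (d * d)) := by
  intro k
  induction k with
  | zero =>
    intro a ha0 had h0
    have haeq : a = d := by omega
    subst haeq
    rw [PySem.List.pyRange_one_eq_nil le_rfl]
    simp [List.foldl_nil]
  | succ k ih =>
    intro a ha0 had hk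
    have hcd : a < d := by omega
    have hn0 : (0 : Int) ≤ (L.length : Int) := by positivity
    have had0 : 0 ≤ a * d := mul_nonneg ha0 hd.le
    set p := min (L.length : Int) (a * d) with hp
    have hp0 : 0 ≤ p := le_min hn0 had0
    have hpn : p ≤ (L.length : Int) := min_le_left _ _
    rw [PySem.List.pyRange_one_cons hcd]
    simp only [List.foldl_cons]
    rw [pvInner_fold L a d (d - 0).toNat 0 p _ rfl hp0 hpn]
    rw [pvFoldl_modify]
    rw [show (d - a).toNat = (d - (a + 1)).toNat + 1 from by omega, List.replicate_succ]
    have hlen : ((PySem.List.pyRange 0 a 1).map (fun i => pvRow L d (i * d))).length = a.toNat := by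
      simp [PySem.List.length_pyRange_one]
    rw [show a.toNat = ((PySem.List.pyRange 0 a 1).map (fun i => pvRow L d (i * d))).length from hlen.symm]
    rw [pvModify_append_cons]
    rw [pvFill_row _ d (d - 0).toNat 0 _ rfl le_rfl (by simp)]
    simp only [Int.toNat_zero, List.take_zero, List.nil_append]
    have hrow : (PySem.List.pyRange 0 d 1).map (fun j => pvG L (p + (j - 0)))
        = pvRow L d (a * d) := by
      unfold pvRow
      refine List.map_congr_left (fun j hj => ?_)
      rw [PySem.List.mem_pyRange_one] at hj
      rw [sub_zero, hp]
      exact pvG_min L (a * d) j hj.1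
    rw [hrow]
    have hd' : ((d.toNat : Int)) = d := Int.toNat_of_nonneg hd.le
    have hpos : min (L.length : Int) (p + ((d - 0).toNat : Int)) = min (L.length : Int) ((a + 1) * d) := by
      rw [sub_zero, hd', hp]
      have h1 : (a + 1) * d = a * d + d := by ring
      rw [h1]
      generalize (a * d) = q at *
      omega
    rw [hpos]
    have hpre : (PySem.List.pyRange 0 a 1).map (fun i => pvRow L d (i * d)) ++ pvRow L d (a * d)
          :: List.replicate (d - (a + 1)).toNat (List.replicate d.toNat (none : Option String))
        = (PySem.List.pyRange 0 (a + 1) 1).map (fun i => pvRow L d (i * d))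
          ++ List.replicate (d - (a + 1)).toNat (List.replicate d.toNat (none : Option String)) := by
      rw [PySem.List.pyRange_one_succ_right ha0]
      simp
    rw [hpre]
    exact ih (a + 1) (by omega) (by omega) (by omega)

-- B's row slice equals A's filled row
lemma pvSlice_row (L : List String) (d i : Int) (hd : 0 < d) (hi : 0 ≤ i) (hid : i < d) :
    PySem.List.slice
        (PySem.List.slice
          (L.map some ++ List.replicate (max (d * d - (L.length : Int)) 0).toNat (some "A"))
          none (some (d * d)))
        (some (i * d)) (some ((i + 1) * d))
      = pvRow L d (i * d) := by
  have hdd : (0 : Int) ≤ d * d := mul_nonneg hd.le hd.le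
  have hid0 : (0 : Int) ≤ i * d := mul_nonneg hi hd.le
  have hi1d : (0 : Int) ≤ (i + 1) * d := mul_nonneg (by omega) hd.le
  have hle : (i + 1) * d ≤ d * d := mul_le_mul_of_nonneg_right (by omega) hd.le
  have hsum : (i + 1) * d = i * d + d := by ring
  rw [PySem.List.slice_to _ hdd, PySem.List.slice_toNat _ hid0 hi1d]
  set pad : List (Option String) :=
    (L.map some ++ List.replicate (max (d * d - (L.length : Int)) 0).toNat (some "A")).take
      (d * d).toNat with hpad
  have hpadlen : pad.length = (d * d).toNat := by
    simp only [hpad, List.length_take, List.length_append, List.length_map,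
      List.length_replicate]
    omega
  have hsub : ((i + 1) * d).toNat - (i * d).toNat = d.toNat := by
    rw [hsum]; omega
  have hbound : (i * d).toNat + d.toNat ≤ (d * d).toNat := by
    have := hle; rw [hsum] at this
    omega
  rw [hsub]
  apply List.ext_getElem
  · simp [pvRow, PySem.List.length_pyRange_one, hpadlen]
    omega
  · intro k h1 h2
    have hk : k < d.toNat := by
      simpa [pvRow, PySem.List.length_pyRange_one] using h2
    have hmlt : (i * d).toNat + k < (d * d).toNat := by omega
    rw [List.getElem_take, List.getElem_drop]
    have hrhs : (pvRow L d (i * d))[k] = pvG L (i * d + k) := by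
      unfold pvRow
      rw [List.getElem_map]
      congr 1
      rw [PySem.List.getElem_pyRange_one]
      omega
    rw [hrhs]
    simp only [hpad, List.getElem_take]
    by_cases hcase : (i * d).toNat + k < L.length
    · rw [List.getElem_append_left (by simpa using hcase)]
      unfold pvG
      rw [if_pos (by omega)]
      rw [List.getElem_map]
      rw [PySem.List.pyGetD_eq_getElem _ _ (by omega) (by omega)]
      have hidx : (i * d + (k : Int)).toNat = (i * d).toNat + k := by omega
      simp only [hidx]
    · rw [List.getElem_append_right (by simpa using hcase)]
      simp only [List.getElem_replicate]
      unfold pvG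
      rw [if_neg (by omega)]

-- ===== VERDICT (by name: the statement is the Claim_ definition above) =====
theorem set_word_in_array_spec : Claim_equal_set_word_in_array := by
  intro arr dencity _
  unfold Spec_set_word_in_array set_word_in_array set_word_in_array_alt
  simp only [pvLines_eq, pvChars_eq]
  set d := dencity with hd
  by_cases hL : pvLines arr = []
  · simp [hL, List.map_const', PySem.List.length_pyRange_one]
  · have hA : (pvLines arr).isEmpty = false := by simp [hL]
    have hB : ((pvLines arr).map some).isEmpty = false := by simp [hL]
    simp only [hA, hB, if_false, Bool.false_eq_true]
    by_cases hdpos : 0 < d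
    · have hmat : (PySem.List.pyRange 0 d 1).map
            (fun _ => (PySem.List.pyRange 0 d 1).map (fun _ => (none : Option String)))
          = List.replicate d.toNat (List.replicate d.toNat (none : Option String)) := by
        simp [List.map_const', PySem.List.length_pyRange_one]
      have hfold := pvOuter_fold (pvLines arr) d hdpos (d - 0).toNat 0 le_rfl hdpos.le rfl
      rw [PySem.List.pyRange_one_eq_nil (le_refl (0 : Int))] at hfold
      have hminz : min ((pvLines arr).length : Int) (0 * d) = 0 := by
        simp
      rw [hminz] at hfold
      simp only [List.map_nil, List.nil_append, sub_zero] at hfold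
      rw [hmat, hfold]
      have htot : max d 0 ^ 2 = d * d := by
        rw [max_eq_left hdpos.le]; ring
      simp only [htot, List.length_map]
      refine (List.map_congr_left (fun i hi => ?_)).symm
      rw [PySem.List.mem_pyRange_one] at hi
      exact pvSlice_row (pvLines arr) d i hdpos hi.1 hi.2
    · rw [PySem.List.pyRange_one_eq_nil (by omega)]
      simp
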